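-- pv_equiv track=rewrite | github.com/Sumerin/Kryptografia_2019 | Krypto/Cipher.py | matrix_cipher
-- ===== SOURCE A (Python) =====
-- def matrix_cipher(message, w):
--     matrix = ["" for w in range(w)]
--     position = 0
--     result = []
--     r = len(message) % (w * w)
--     if r != 0:
--         message += ''.join("=" for _ in range((w * w) - r))
--
--     while position < len(message):
--         for row in range(w):
--             start = position
--             end = position + w
--             matrix[row] = message[start:end]
--             position = end
--         for col in range(w):
--             for row in range(w):
--                 result.append(matrix[row][col])
--
--     return "".join(result)
-- ===== SOURCE B (Python) =====
-- def matrix_cipher(message, w):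
--     r = len(message) % (w * w)
--     if r:
--         message += "=" * (w * w - r)
--     out = []
--     for b in range(0, len(message), w * w):
--         for k in range(w * w):
--             out.append(message[b + (k % w) * w + k // w])
--     return "".join(out)
-- ===== Notes on version B (the rewrite author's own statement) =====
-- stated objective: alternative
-- what changed: B drops A's w-row matrix buffer entirely: it pads the message the same way, then emits each w*w block's column-major read by direct index arithmetic message[b + (k % w) * w + k // w] in one nested range loop.
import Mathlib
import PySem

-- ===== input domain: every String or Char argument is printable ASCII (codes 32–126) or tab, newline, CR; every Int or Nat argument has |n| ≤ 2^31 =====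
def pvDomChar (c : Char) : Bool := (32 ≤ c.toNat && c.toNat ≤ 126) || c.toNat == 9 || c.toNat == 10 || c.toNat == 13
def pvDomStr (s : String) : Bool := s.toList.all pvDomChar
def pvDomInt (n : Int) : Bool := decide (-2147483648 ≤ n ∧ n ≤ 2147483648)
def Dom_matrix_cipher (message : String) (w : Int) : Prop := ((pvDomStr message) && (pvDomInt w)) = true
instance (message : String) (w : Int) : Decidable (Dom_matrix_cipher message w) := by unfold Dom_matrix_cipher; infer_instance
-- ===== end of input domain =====

-- B removes A's w-row matrix buffer: it pads identically, then reads each w*w block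
-- column-major by direct index arithmetic (objective: alternative, same cost).


-- ===== PORT A =====
-- A's while loop; the fuel only makes the recursion structural: on every Pre_-input each
-- iteration advances `position` by w*w ≥ 1, so `m.length + 1` iterations are never exhausted.
-- `matrix[row] = …` is Python list assignment (pySetD; row is in range on Pre_-inputs);
-- `matrix[row][col]` indexing is via pyGetD with a default that is never used on Pre_-inputs.
def mcWhileA (m : List Char) (w : Int) : Nat → List (List Char) → Int → List Char → List Char
  | 0, _, _, result => result
  | fuel+1, matrix, position, result =>
    if position < (m.length : Int) then
      let st := (PySem.List.pyRange 0 w 1).foldl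
        (fun (st : List (List Char) × Int) row =>
          (PySem.List.pySetD st.1 row (PySem.List.slice m (some st.2) (some (st.2 + w))), st.2 + w))
        (matrix, position)
      let result := (PySem.List.pyRange 0 w 1).foldl
        (fun res col =>
          (PySem.List.pyRange 0 w 1).foldl
            (fun res row => res ++ [PySem.List.pyGetD (PySem.List.pyGetD st.1 row []) col ' ']) res)
        result
      mcWhileA m w fuel st.1 st.2 result
    else result

-- `len(message) % (w*w)` raises ZeroDivisionError when w = 0: those inputs are outside Pre_.
def matrix_cipher (message : String) (w : Int) : String :=
  let matrix := (PySem.List.pyRange 0 w 1).map (fun _ => ([] : List Char))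
  let m0 := message.toList
  let r := PySem.Int.mod (m0.length : Int) (w * w)
  let m := if r ≠ 0 then m0 ++ (PySem.List.pyRange 0 (w * w - r) 1).map (fun _ => '=') else m0
  String.mk (mcWhileA m w (m.length + 1) matrix 0 [])

-- ===== PORT B =====
-- Port of Source B: same padding, then for each block base b and offset k append
-- message[b + (k % w)*w + k // w]; indexing via pyGetD (in range on Pre_-inputs).
def matrix_cipher_alt (message : String) (w : Int) : String :=
  let m0 := message.toList
  let r := PySem.Int.mod (m0.length : Int) (w * w)
  let m := if r ≠ 0 then m0 ++ List.replicate (w * w - r).toNat '=' else m0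
  String.mk ((PySem.List.pyRange 0 (m.length : Int) (w * w)).foldl
    (fun out b =>
      (PySem.List.pyRange 0 (w * w) 1).foldl
        (fun out k =>
          out ++ [PySem.List.pyGetD m (b + PySem.Int.mod k w * w + PySem.Int.floordiv k w) ' ']) out)
    [])

-- ===== PRECONDITION & SPEC =====
-- Pre_ excludes only inputs on which Python A never returns: w = 0 raises ZeroDivisionError,
-- and w < 0 with a nonempty message loops forever (the row loop is empty, position never moves).
def Pre_matrix_cipher (message : String) (w : Int) : Prop := 1 ≤ w ∨ (message = "" ∧ w < 0)
instance (message : String) (w : Int) : Decidable (Pre_matrix_cipher message w) := by unfold Pre_matrix_cipher; infer_instance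
def pvWitness_matrix_cipher : String × Int := ("abcd", 2)

def Spec_matrix_cipher (message : String) (w : Int) (out : String) : Prop := out = matrix_cipher_alt message w
instance (message : String) (w : Int) (out : String) : Decidable (Spec_matrix_cipher message w out) := by unfold Spec_matrix_cipher; infer_instance

-- ===== CLAIM (what is proved, stated in full; the proofs are below) =====
def Claim_equal_matrix_cipher : Prop := ∀ (message : String) (w : Int), Dom_matrix_cipher message w → Pre_matrix_cipher message w → Spec_matrix_cipher message w (matrix_cipher message w)

-- ===== LEMMAS AND PROOFS =====

-- one padded block starting at offset p, read column-major (shared normal form of both loops)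
def chunkN (m : List Char) (wn p : Nat) : List Char :=
  (List.range (wn * wn)).map (fun t => m.getD (p + t % wn * wn + t / wn) ' ')

-- A's row loop, with the range already turned into Nat counters
def rowFold (m : List Char) (wn : Nat) (n : Nat) (mat : List (List Char)) (p : Int) :
    List (List Char) × Int :=
  (List.range n).foldl
    (fun (st : List (List Char) × Int) (row : Nat) =>
      (PySem.List.pySetD st.1 (row : Int)
        (PySem.List.slice m (some st.2) (some (st.2 + (wn : Int)))), st.2 + (wn : Int)))
    (mat, p)

lemma flatMap_transpose (g : Nat → Nat → Char) (wn : Nat) (hw : 0 < wn) : ∀ c : Nat,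
    (List.range c).flatMap (fun col => (List.range wn).map (fun row => g row col))
      = (List.range (c * wn)).map (fun t => g (t % wn) (t / wn)) := by
  intro c
  induction c with
  | zero => simp
  | succ c ih =>
    rw [List.range_succ, List.flatMap_append, ih, Nat.succ_mul, List.range_add, List.map_append,
        List.map_map]
    congr 1
    rw [List.flatMap_cons, List.flatMap_nil, List.append_nil]
    apply List.map_congr_left
    intro s hs
    have hs' : s < wn := List.mem_range.mp hs
    have h1 : (c * wn + s) % wn = s := by
      rw [Nat.mul_comm, Nat.mul_add_mod, Nat.mod_eq_of_lt hs']
    have h2 : (c * wn + s) / wn = c := by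
      rw [Nat.mul_comm, Nat.mul_add_div hw, Nat.div_eq_of_lt hs', Nat.add_zero]
    simp [h1, h2]

lemma rowFoldN (m : List Char) (wn : Nat) : ∀ (n : Nat), n ≤ wn →
    ∀ (mat : List (List Char)) (pn : Nat), mat.length = wn →
    (rowFold m wn n mat (pn : Int)).1.length = wn ∧
    (rowFold m wn n mat (pn : Int)).2 = ((pn + n * wn : Nat) : Int) ∧
    ∀ i, i < wn → (rowFold m wn n mat (pn : Int)).1.getD i [] =
      if i < n then (m.drop (pn + i * wn)).take wn else mat.getD i [] := by
  intro n
  induction n with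
  | zero =>
    intro _ mat pn hlen
    refine ⟨hlen, by simp [rowFold], ?_⟩
    intro i hi; simp [rowFold]
  | succ n ih =>
    intro hn mat pn hlen
    obtain ⟨ih1, ih2, ih3⟩ := ih (by omega) mat pn hlen
    have hstep : rowFold m wn (n+1) mat (pn : Int) =
        (PySem.List.pySetD (rowFold m wn n mat (pn : Int)).1 ((n : Nat) : Int)
          (PySem.List.slice m (some (rowFold m wn n mat (pn : Int)).2)
            (some ((rowFold m wn n mat (pn : Int)).2 + (wn : Int)))),
         (rowFold m wn n mat (pn : Int)).2 + (wn : Int)) := by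
      simp only [rowFold, List.range_succ, List.foldl_append, List.foldl_cons, List.foldl_nil]
    have hslice : PySem.List.slice m (some (rowFold m wn n mat (pn : Int)).2)
        (some ((rowFold m wn n mat (pn : Int)).2 + (wn : Int)))
        = (m.drop (pn + n * wn)).take wn := by
      rw [ih2]; exact PySem.List.slice_natCast_add m (pn + n * wn) wn
    rw [hstep]
    refine ⟨?_, ?_, ?_⟩
    · dsimp only; rw [PySem.List.length_pySetD]; exact ih1
    · dsimp only; rw [ih2]; push_cast; ring
    · intro i hi
      dsimp only
      rw [hslice, PySem.List.pySetD_natCast]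
      rw [List.getD_eq_getElem _ _ (by simp only [List.length_set, ih1]; exact hi)]
      rw [List.getElem_set]
      by_cases hni : n = i
      · subst hni
        rw [if_pos rfl, if_pos (by omega)]
      · rw [if_neg hni]
        rw [← List.getD_eq_getElem _ ([]) (by rw [ih1]; exact hi)]
        rw [ih3 i hi]
        by_cases hlt : i < n
        · rw [if_pos hlt, if_pos (by omega)]
        · rw [if_neg hlt, if_neg (by omega)]

lemma whileA_eq (m : List Char) (wn : Nat) (hw : 0 < wn) : ∀ (q fuel pn : Nat)
    (mat : List (List Char)) (res : List Char), q ≤ fuel → mat.length = wn →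
    pn + q * (wn * wn) = m.length →
    mcWhileA m (wn : Int) fuel mat (pn : Int) res
      = res ++ (List.range q).flatMap (fun j => chunkN m wn (pn + j * (wn * wn))) := by
  intro q
  induction q with
  | zero =>
    intro fuel pn mat res _ _ hlen
    simp only [Nat.zero_mul, Nat.add_zero] at hlen
    cases fuel with
    | zero => simp [mcWhileA]
    | succ f => simp [mcWhileA, hlen]
  | succ q ih =>
    intro fuel pn mat res hf hmat hlen
    obtain ⟨f, rfl⟩ : ∃ f, fuel = f + 1 := ⟨fuel - 1, by omega⟩
    have hWpos : 0 < wn * wn := Nat.mul_pos hw hw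
    have hWle : wn * wn ≤ (q + 1) * (wn * wn) := Nat.le_mul_of_pos_left _ (by omega)
    have hpn : pn + wn * wn ≤ m.length := by linarith
    have hcond : (pn : Int) < (m.length : Int) := by
      have : pn < m.length := by linarith
      exact_mod_cast this
    simp only [mcWhileA, if_pos hcond]
    have hfold : (PySem.List.pyRange 0 (wn : Int) 1).foldl
        (fun (st : List (List Char) × Int) row =>
          (PySem.List.pySetD st.1 row
            (PySem.List.slice m (some st.2) (some (st.2 + (wn : Int)))), st.2 + (wn : Int)))
        (mat, (pn : Int)) = rowFold m wn wn mat (pn : Int) := by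
      rw [PySem.List.pyRange_zero_nat, List.foldl_map]; rfl
    rw [hfold]
    obtain ⟨h1, h2, h3⟩ := rowFoldN m wn wn le_rfl mat pn hmat
    have hinner : ∀ (acc : List Char) (col : Nat), col ∈ List.range wn →
        ((List.range wn).map (fun k : Nat => (k : Int))).foldl
          (fun res row => res ++ [PySem.List.pyGetD
            (PySem.List.pyGetD (rowFold m wn wn mat (pn : Int)).1 row []) (col : Int) ' ']) acc
        = acc ++ (List.range wn).map (fun row => m.getD (pn + row * wn + col) ' ') := by
      intro acc col hcol
      have hcol' : col < wn := List.mem_range.mp hcol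
      rw [List.foldl_map, PySem.List.foldl_append_singleton_eq_map]
      congr 1
      apply List.map_congr_left
      intro row hrow
      have hrow' : row < wn := List.mem_range.mp hrow
      rw [PySem.List.pyGetD_natCast ((rowFold m wn wn mat (pn : Int)).1) row ([] : List Char),
          h3 row hrow', if_pos hrow']
      have e1 : (row + 1) * wn ≤ wn * wn := Nat.mul_le_mul_right wn (by omega)
      have e2 : (row + 1) * wn = row * wn + wn := by ring
      have hlen2 : pn + row * wn + wn ≤ m.length := by linarith
      have hwnle : wn ≤ m.length - (pn + row * wn) := Nat.le_sub_of_add_le (by linarith)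
      have hdt : ((m.drop (pn + row * wn)).take wn).length = wn := by
        rw [List.length_take, List.length_drop, Nat.min_eq_left hwnle]
      rw [PySem.List.pyGetD_natCast,
          List.getD_eq_getElem _ _ (by rw [hdt]; exact hcol'),
          List.getElem_take, List.getElem_drop,
          ← List.getD_eq_getElem _ (' ') (by linarith)]
    have hread : ∀ res' : List Char,
        (PySem.List.pyRange 0 (wn : Int) 1).foldl
          (fun res col =>
            (PySem.List.pyRange 0 (wn : Int) 1).foldl
              (fun res row => res ++ [PySem.List.pyGetD
                (PySem.List.pyGetD (rowFold m wn wn mat (pn : Int)).1 row []) col ' ']) res)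
          res' = res' ++ chunkN m wn pn := by
      intro res'
      rw [PySem.List.pyRange_zero_nat, List.foldl_map]
      rw [PySem.List.foldl_congr_mem (List.range wn) _
        (fun acc col => acc ++ (List.range wn).map (fun row => m.getD (pn + row * wn + col) ' '))
        res' (fun acc col hcol => hinner acc col hcol)]
      rw [PySem.List.foldl_append_eq_flatMap]
      rw [flatMap_transpose (fun row col => m.getD (pn + row * wn + col) ' ') wn hw wn]
      rfl
    rw [hread, h2]
    rw [ih f (pn + wn * wn) _ _ (by omega) h1
      (by have : (q + 1) * (wn * wn) = wn * wn + q * (wn * wn) := by ring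
          linarith)]
    rw [List.range_succ_eq_map, List.flatMap_cons, List.flatMap_map]
    have hfun : (fun j : Nat => chunkN m wn (pn + wn * wn + j * (wn * wn)))
        = (fun a : Nat => chunkN m wn (pn + Nat.succ a * (wn * wn))) := by
      funext j
      apply congrArg
      rw [Nat.succ_mul]
      ring
    rw [hfun, Nat.zero_mul, Nat.add_zero, List.append_assoc]

lemma altB_eq (m : List Char) (wn : Nat) (hw : 0 < wn) (q : Nat)
    (hlen : m.length = q * (wn * wn)) :
    (PySem.List.pyRange 0 (m.length : Int) ((wn : Int) * (wn : Int))).foldl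
      (fun out b =>
        (PySem.List.pyRange 0 ((wn : Int) * (wn : Int)) 1).foldl
          (fun out k =>
            out ++ [PySem.List.pyGetD m
              (b + PySem.Int.mod k (wn : Int) * (wn : Int) + PySem.Int.floordiv k (wn : Int)) ' ']) out)
      ([] : List Char)
      = (List.range q).flatMap (fun j => chunkN m wn (j * (wn * wn))) := by
  have hWpos : 0 < wn * wn := Nat.mul_pos hw hw
  have hcast : ((wn : Int) * (wn : Int)) = ((wn * wn : Nat) : Int) := by push_cast; ring
  have hchunk : ∀ (j : Nat) (out : List Char),
      (PySem.List.pyRange 0 ((wn : Int) * (wn : Int)) 1).foldl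
        (fun out k =>
          out ++ [PySem.List.pyGetD m
            ((0 + ((wn * wn : Nat) : Int) * (j : Int)) + PySem.Int.mod k (wn : Int) * (wn : Int)
              + PySem.Int.floordiv k (wn : Int)) ' ']) out
      = out ++ chunkN m wn (j * (wn * wn)) := by
    intro j out
    rw [hcast, PySem.List.pyRange_zero_nat, List.foldl_map,
        PySem.List.foldl_append_singleton_eq_map]
    congr 1
    unfold chunkN
    apply List.map_congr_left
    intro k hk
    rw [PySem.Int.mod_natCast, PySem.Int.floordiv_natCast]
    have harg : (0 + ((wn * wn : Nat) : Int) * (j : Int) + ((k % wn : Nat) : Int) * (wn : Int)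
        + ((k / wn : Nat) : Int)) = ((j * (wn * wn) + k % wn * wn + k / wn : Nat) : Int) := by
      push_cast; ring
    rw [harg, PySem.List.pyGetD_natCast]
  -- trip count of range(0, len(m), w*w)
  have htrip : PySem.List.pyRange 0 (m.length : Int) ((wn : Int) * (wn : Int))
      = (List.range q).map (fun k => 0 + ((wn * wn : Nat) : Int) * (k : Nat)) := by
    rw [hcast, PySem.List.pyRange_of_pos 0 (m.length : Int) (by exact_mod_cast hWpos)]
    congr 1
    by_cases hq : q = 0
    · subst hq
      simp at hlen
      rw [hlen]
      simp
    · have hlpos : (0 : Int) < (m.length : Int) := by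
        have : 0 < m.length := by
          rw [hlen]; exact Nat.mul_pos (by omega) hWpos
        exact_mod_cast this
      rw [if_pos hlpos]
      have e1 : (m.length : Int) - 0 + ((wn * wn : Nat) : Int) - 1
          = ((q * (wn * wn) + (wn * wn - 1) : Nat) : Int) := by
        rw [hlen]; push_cast; omega
      rw [e1, ← Int.natCast_div]
      have e2 : (q * (wn * wn) + (wn * wn - 1)) / (wn * wn) = q := by
        rw [Nat.mul_comm q, Nat.mul_add_div hWpos, Nat.div_eq_of_lt (by omega), Nat.add_zero]
      rw [e2, Int.toNat_natCast]
  rw [htrip, List.foldl_map]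
  rw [PySem.List.foldl_congr_mem (List.range q) _
    (fun out j => out ++ chunkN m wn (j * (wn * wn))) []
    (fun out j _ => hchunk j out)]
  rw [PySem.List.foldl_append_eq_flatMap, List.nil_append]

-- ===== VERDICT (by name: the statement is the Claim_ definition above) =====
theorem matrix_cipher_spec : Claim_equal_matrix_cipher := by
  intro message w _ hpre
  unfold Spec_matrix_cipher
  rcases hpre with hw | ⟨hm, hw⟩
  · -- 1 ≤ w
    obtain ⟨wn, rfl⟩ : ∃ wn : Nat, w = (wn : Int) :=
      ⟨w.toNat, (Int.toNat_of_nonneg (by omega)).symm⟩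
    have hwn : 0 < wn := by exact_mod_cast hw
    have hWpos : 0 < wn * wn := Nat.mul_pos hwn hwn
    have hcast : ((wn : Int) * (wn : Int)) = ((wn * wn : Nat) : Int) := by push_cast; ring
    simp only [matrix_cipher, matrix_cipher_alt]
    have hr : PySem.Int.mod ((message.toList.length : Nat) : Int) ((wn : Int) * (wn : Int))
        = ((message.toList.length % (wn * wn) : Nat) : Int) := by
      rw [hcast, PySem.Int.mod_natCast]
    rw [hr]
    have hmat0 : ((PySem.List.pyRange 0 (wn : Int) 1).map
        (fun _ => ([] : List Char))).length = wn := by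
      rw [PySem.List.pyRange_zero_nat]; simp
    by_cases h0 : message.toList.length % (wn * wn) = 0
    · rw [h0]
      simp only [Nat.cast_zero]
      rw [if_neg (by simp), if_neg (by simp)]
      have hlen : message.toList.length = (message.toList.length / (wn * wn)) * (wn * wn) :=
        (Nat.div_mul_cancel (Nat.dvd_of_mod_eq_zero h0)).symm
      have hA := whileA_eq message.toList wn hwn (message.toList.length / (wn * wn))
        (message.toList.length + 1) 0
        ((PySem.List.pyRange 0 (wn : Int) 1).map (fun _ => ([] : List Char))) []
        (by have := Nat.div_le_self message.toList.length (wn * wn); omega) hmat0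
        (by omega)
      have hB := altB_eq message.toList wn hwn (message.toList.length / (wn * wn)) hlen
      simp only [Nat.cast_zero, Nat.zero_add, List.nil_append] at hA
      apply congrArg String.mk
      rw [hA, hB]
    · have hne : ((message.toList.length % (wn * wn) : Nat) : Int) ≠ 0 := by
        exact_mod_cast h0
      rw [if_pos hne, if_pos hne]
      have hmodlt : message.toList.length % (wn * wn) < wn * wn :=
        Nat.mod_lt _ hWpos
      have epad : ((wn : Int) * (wn : Int) - ((message.toList.length % (wn * wn) : Nat) : Int))
          = (((wn * wn - message.toList.length % (wn * wn)) : Nat) : Int) := by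
        rw [hcast]; omega
      have hpadA : (PySem.List.pyRange 0
            ((wn : Int) * (wn : Int) - ((message.toList.length % (wn * wn) : Nat) : Int)) 1).map
            (fun _ => '=')
          = List.replicate (wn * wn - message.toList.length % (wn * wn)) '=' := by
        rw [epad, PySem.List.pyRange_zero_nat, List.map_map]
        show (List.range _).map (fun _ => '=') = _
        rw [List.map_const', List.length_range]
      have hpadB : ((wn : Int) * (wn : Int)
            - ((message.toList.length % (wn * wn) : Nat) : Int)).toNat
          = wn * wn - message.toList.length % (wn * wn) := by
        rw [epad, Int.toNat_natCast]
      rw [hpadA, hpadB]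
      have hsub : message.toList.length % (wn * wn)
          + (wn * wn - message.toList.length % (wn * wn)) = wn * wn :=
        Nat.add_sub_cancel' (le_of_lt hmodlt)
      have hdm := Nat.div_add_mod message.toList.length (wn * wn)
      have hmul : (message.toList.length / (wn * wn) + 1) * (wn * wn)
          = (wn * wn) * (message.toList.length / (wn * wn)) + (wn * wn) := by ring
      have hlen : (message.toList
            ++ List.replicate (wn * wn - message.toList.length % (wn * wn)) '=').length
          = (message.toList.length / (wn * wn) + 1) * (wn * wn) := by
        rw [List.length_append, List.length_replicate]
        linarith
      have hq : message.toList.length / (wn * wn) + 1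
          ≤ (message.toList
            ++ List.replicate (wn * wn - message.toList.length % (wn * wn)) '=').length + 1 := by
        have h5 := Nat.le_mul_of_pos_right (message.toList.length / (wn * wn) + 1) hWpos
        linarith
      have hA := whileA_eq
        (message.toList ++ List.replicate (wn * wn - message.toList.length % (wn * wn)) '=')
        wn hwn (message.toList.length / (wn * wn) + 1)
        ((message.toList
            ++ List.replicate (wn * wn - message.toList.length % (wn * wn)) '=').length + 1) 0
        ((PySem.List.pyRange 0 (wn : Int) 1).map (fun _ => ([] : List Char))) []
        hq hmat0 (by linarith)
      have hB := altB_eq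
        (message.toList ++ List.replicate (wn * wn - message.toList.length % (wn * wn)) '=')
        wn hwn (message.toList.length / (wn * wn) + 1) hlen
      simp only [Nat.cast_zero, Nat.zero_add, List.nil_append] at hA
      apply congrArg String.mk
      rw [hA, hB]
  · -- message = "", w < 0: both sides are the empty string
    subst hm
    have hW : (0 : Int) < w * w := mul_pos_of_neg_of_neg hw hw
    simp only [matrix_cipher, matrix_cipher_alt]
    have htl : ("" : String).toList = ([] : List Char) := rfl
    rw [htl]
    have hr0 : PySem.Int.mod ((([] : List Char).length : Nat) : Int) (w * w) = 0 := by
      rw [show (((([] : List Char).length : Nat)) : Int) = 0 by simp]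
      exact (PySem.Int.mod_eq_zero_iff_dvd 0 (w * w)).mpr (dvd_zero _)
    rw [hr0]
    rw [if_neg (by simp), if_neg (by simp)]
    apply congrArg String.mk
    rw [PySem.List.pyRange_of_pos 0 _ hW]
    simp [mcWhileA]
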